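-- pv_equiv track=rewrite | github.com/h8rtv/csr31 | trabalho_final/app/lib/manchester_code.py | manchester_encode
-- ===== SOURCE A (Python) =====
-- def manchester_encode(mensagem):
--   binario = ""
--   for x in mensagem:
--     binario += '{0:08b}'.format(ord(x))
--
--   clock = [clock % 2 for clock in range(1, len(binario) * 2 + 1)]
--   clockStr = ''.join(str(e) for e in clock)
--   manchester = ""
--   cont = 0
--   for i in binario:
--     if (i == '1' and clockStr[cont] == '0') or (i == '0' and clockStr[cont] == '1'):
--       manchester += '1'
--     else:
--       manchester += '0'
--     cont = cont + 1
--     if (i == '1' and clockStr[cont] == '0') or (i == '0' and clockStr[cont] == '1'):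
--       manchester += '1'
--     else:
--       manchester += '0'
--     cont = cont + 1
--
--   return manchester
-- ===== SOURCE B (Python) =====
-- def manchester_encode(mensagem):
--     # Direct per-bit mapping: no clock table, no intermediate binary string.
--     out = []
--     for x in mensagem:
--         o = ord(x)
--         for k in range(7, -1, -1):
--             out.append('01' if (o >> k) & 1 else '10')
--     return ''.join(out)
-- ===== Notes on version B (the rewrite author's own statement) =====
-- stated objective: simpler
-- what changed: B drops the alternating clock list/string and the two index-based comparisons per bit, emitting each bit's Manchester pair directly from the character code by shifting and masking, joined once at the end.
import Mathlib
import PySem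

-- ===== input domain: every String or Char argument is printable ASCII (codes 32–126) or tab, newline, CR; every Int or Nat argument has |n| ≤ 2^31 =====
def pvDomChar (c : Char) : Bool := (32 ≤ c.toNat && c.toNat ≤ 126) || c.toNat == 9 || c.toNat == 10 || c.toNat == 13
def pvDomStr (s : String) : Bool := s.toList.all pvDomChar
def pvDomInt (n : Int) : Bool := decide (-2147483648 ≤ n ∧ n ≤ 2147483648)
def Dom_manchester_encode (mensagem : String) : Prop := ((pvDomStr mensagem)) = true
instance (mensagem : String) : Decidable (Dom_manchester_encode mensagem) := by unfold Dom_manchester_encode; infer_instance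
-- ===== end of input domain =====

-- B drops A's alternating clock list/string and the two index-based comparisons per bit, emitting
-- each bit's Manchester pair directly from the character code by shifting and masking.

-- ===== PORT A =====
-- '{0:08b}'.format(ord x): 8-digit binary; exact for codes < 256 (all Dom chars have code ≤ 126)
def pvFmt8 (n : Nat) : List Char :=
  (List.range 8).map (fun k => if n.testBit (7 - k) then '1' else '0')

-- clockStr[cont]: cont stays < len(clockStr) throughout the loop, so getD with a dummy default is exact
def manchester_encode (mensagem : String) : String :=
  let binario : List Char := mensagem.toList.foldl (fun acc x => acc ++ pvFmt8 x.toNat) []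
  let clock : List Int :=
    (PySem.List.pyRange 1 ((binario.length : Int) * 2 + 1) 1).map (fun c => PySem.Int.mod c 2)
  let clockStr : List Char := (clock.map (fun e => (PySem.Int.toStr e).toList)).flatten
  let res := binario.foldl (fun (st : List Char × Nat) i =>
    let manchester := st.1
    let cont := st.2
    let m1 := if (i = '1' ∧ PySem.List.pyGetD clockStr (cont : Int) ' ' = '0') ∨
                 (i = '0' ∧ PySem.List.pyGetD clockStr (cont : Int) ' ' = '1')
              then manchester ++ ['1'] else manchester ++ ['0']
    let cont1 := cont + 1
    let m2 := if (i = '1' ∧ PySem.List.pyGetD clockStr (cont1 : Int) ' ' = '0') ∨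
                 (i = '0' ∧ PySem.List.pyGetD clockStr (cont1 : Int) ' ' = '1')
              then m1 ++ ['1'] else m1 ++ ['0']
    (m2, cont1 + 1)) (([] : List Char), 0)
  String.mk res.1

-- ===== PORT B =====
def manchester_encode_alt (mensagem : String) : String :=
  let out : List (List Char) := mensagem.toList.foldl (fun acc x =>
    (PySem.List.pyRange 7 (-1) (-1)).foldl (fun acc2 k =>
      -- k ranges over 7..0, so k.toNat is exact for '(o >> k) & 1'
      acc2 ++ [if (x.toNat >>> k.toNat) &&& 1 ≠ 0 then ['0','1'] else ['1','0']]) acc) []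
  String.mk out.flatten

-- ===== PRECONDITION & SPEC =====
def Spec_manchester_encode (mensagem : String) (out : String) : Prop := out = manchester_encode_alt mensagem
instance (mensagem : String) (out : String) : Decidable (Spec_manchester_encode mensagem out) := by unfold Spec_manchester_encode; infer_instance

-- ===== CLAIM (what is proved, stated in full; the proofs are below) =====
def Claim_equal_manchester_encode : Prop := ∀ (mensagem : String), Dom_manchester_encode mensagem → Spec_manchester_encode mensagem (manchester_encode mensagem)

-- ===== LEMMAS AND PROOFS =====

-- common specification: the Manchester chunk of one character
def pvEncChar (n : Nat) : List Char :=
  (List.range 8).flatMap (fun k => if n.testBit (7 - k) then ['0','1'] else ['1','0'])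

theorem pvFlattenFlatMap {α β : Type} (l : List α) (f : α → List (List β)) :
    (l.flatMap f).flatten = l.flatMap (fun x => (f x).flatten) := by
  induction l with
  | nil => rfl
  | cons x xs ih => simp [ih]

-- B equals the flatMap of pvEncChar
theorem pvB_eq (mensagem : String) :
    manchester_encode_alt mensagem =
    String.mk (mensagem.toList.flatMap (fun x => pvEncChar x.toNat)) := by
  unfold manchester_encode_alt
  simp only [PySem.List.foldl_append_eq_flatMap, List.nil_append]
  congr 1
  rw [pvFlattenFlatMap]
  apply List.flatMap_congr
  intro x _
  rw [pvFlattenFlatMap, PySem.List.pyRange_neg_one, List.flatMap_map, pvEncChar]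
  apply List.flatMap_congr
  intro k hk
  simp only [List.mem_range] at hk
  have h1 : ((7 : Int) - (k : Int)).toNat = 7 - k := by omega
  simp only [h1, List.flatten_cons, List.flatten_nil, List.append_nil, Nat.testBit, Nat.and_comm]
  simp

-- the clock string is the alternating pattern '1','0','1','0',…
def pvClockF (k : Nat) : Char := if k % 2 = 0 then '1' else '0'

theorem pvClock_elem (m : Nat) :
    PySem.Int.toChars ((1 + (m : Int)) % 2) = [pvClockF m] := by
  rcases Nat.even_or_odd m with ⟨c, hc⟩ | ⟨c, hc⟩ <;> subst hc
  · have h : (1 + ((c + c : Nat) : Int)) % 2 = 1 := by omega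
    have hp : (c + c) % 2 = 0 := by omega
    rw [h, pvClockF, if_pos hp]; decide
  · have h : (1 + ((2 * c + 1 : Nat) : Int)) % 2 = 0 := by omega
    have hp : ¬ (2 * c + 1) % 2 = 0 := by omega
    rw [h, pvClockF, if_neg hp]; decide

theorem pvClock_eq (n : Nat) :
    ((((PySem.List.pyRange 1 ((n : Int) * 2 + 1) 1).map (fun c => PySem.Int.mod c 2)).map
        (fun e => (PySem.Int.toStr e).toList)).flatten) =
    (List.range (2 * n)).map pvClockF := by
  rw [PySem.List.pyRange_one]
  have h1 : ((n : Int) * 2 + 1 - 1).toNat = 2 * n := by omega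
  rw [h1, List.map_map, List.map_map]
  induction (2 * n) with
  | zero => rfl
  | succ m ih =>
    rw [List.range_succ, List.map_append, List.map_append, List.flatten_append, ih]
    congr 1
    simp [Function.comp, pvClock_elem]

theorem pvClock_get (N i : Nat) (h : i < 2 * N) :
    PySem.List.pyGetD ((List.range (2 * N)).map pvClockF) (i : Int) ' ' = pvClockF i := by
  rw [PySem.List.pyGetD_natCast, PySem.List.getD_map_range _ _ _ _ h]

-- A's bit loop with the clock list abstracted: each bit maps to its Manchester pair
theorem pvA_loop (cs : List Char) (N : Nat) (hcs : cs = (List.range (2 * N)).map pvClockF)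
    (bs : List Char) :
    ∀ (acc : List Char) (cont : Nat), cont % 2 = 0 → cont + 2 * bs.length ≤ 2 * N →
    (∀ b ∈ bs, b = '0' ∨ b = '1') →
    (bs.foldl (fun (st : List Char × Nat) i =>
      (if i = '1' ∧ PySem.List.pyGetD cs (↑(st.2 + 1)) ' ' = '0' ∨
          i = '0' ∧ PySem.List.pyGetD cs (↑(st.2 + 1)) ' ' = '1' then
        (if i = '1' ∧ PySem.List.pyGetD cs (↑st.2) ' ' = '0' ∨
            i = '0' ∧ PySem.List.pyGetD cs (↑st.2) ' ' = '1' then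
          st.1 ++ ['1'] else st.1 ++ ['0']) ++ ['1']
      else
        (if i = '1' ∧ PySem.List.pyGetD cs (↑st.2) ' ' = '0' ∨
            i = '0' ∧ PySem.List.pyGetD cs (↑st.2) ' ' = '1' then
          st.1 ++ ['1'] else st.1 ++ ['0']) ++ ['0'],
      st.2 + 1 + 1)) (acc, cont)).1 =
      acc ++ bs.flatMap (fun b => if b = '1' then ['0','1'] else ['1','0']) := by
  subst hcs
  induction bs with
  | nil => intro acc cont _ _ _; simp
  | cons b bs ih =>
    intro acc cont hev hle hbits
    have hlen : cont + 2 * (bs.length + 1) ≤ 2 * N := by simpa [List.length_cons] using hle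
    have h0 : cont < 2 * N := by omega
    have h1 : cont + 1 < 2 * N := by omega
    have hc0 : pvClockF cont = '1' := by simp [pvClockF, hev]
    have hc1 : pvClockF (cont + 1) = '0' := by
      have : (cont + 1) % 2 = 1 := by omega
      simp [pvClockF, this]
    simp only [List.foldl_cons]
    have hg0 := pvClock_get N cont h0
    have hg1 := pvClock_get N (cont + 1) h1
    rcases hbits b (by simp) with hb | hb <;> subst hb <;>
      simp only [hg0, hg1, hc0, hc1] <;>
      simp only [Char.reduceEq, and_true, and_false, or_false, false_or,
        ite_true, ite_false] <;>
      rw [ih _ (cont + 1 + 1) (by omega) (by omega) (fun x hx => hbits x (by simp [hx]))] <;>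
      simp

theorem pvFmt8_bits (n : Nat) : ∀ b ∈ pvFmt8 n, b = '0' ∨ b = '1' := by
  intro b hb
  simp only [pvFmt8, List.mem_map] at hb
  obtain ⟨k, _, hk⟩ := hb
  split at hk <;> simp [← hk]

theorem pvFmt8_expand (n : Nat) :
    (pvFmt8 n).flatMap (fun b => if b = '1' then ['0','1'] else ['1','0']) = pvEncChar n := by
  rw [pvFmt8, List.flatMap_map, pvEncChar]
  apply List.flatMap_congr
  intro k _
  split <;> simp

-- A equals the flatMap of pvEncChar
theorem pvA_eq (mensagem : String) :
    manchester_encode mensagem =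
    String.mk (mensagem.toList.flatMap (fun x => pvEncChar x.toNat)) := by
  unfold manchester_encode
  simp only [PySem.List.foldl_append_eq_flatMap, List.nil_append, pvClock_eq]
  refine congrArg String.mk ?_
  have hbits : ∀ b ∈ mensagem.toList.flatMap (fun x => pvFmt8 x.toNat), b = '0' ∨ b = '1' := by
    intro b hb
    obtain ⟨x, _, hx⟩ := List.mem_flatMap.mp hb
    exact pvFmt8_bits _ b hx
  rw [pvA_loop _ (mensagem.toList.flatMap (fun x => pvFmt8 x.toNat)).length rfl _ [] 0
        (by omega) (by omega) hbits]
  rw [List.nil_append, List.flatMap_assoc]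
  exact List.flatMap_congr (fun x _ => pvFmt8_expand x.toNat)

-- ===== VERDICT (by name: the statement is the Claim_ definition above) =====
theorem manchester_encode_spec : Claim_equal_manchester_encode := by
  intro mensagem _
  unfold Spec_manchester_encode
  rw [pvA_eq, pvB_eq]
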